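-- pv_equiv track=rewrite | github.com/konszymanski/leetcode-dataset | obfuscated_solutions/python/0564-find-the-closest-palindrome/solution_2_universal_wrap.py | convert
-- ===== SOURCE A (Python) =====
-- def convert(num: int) ->int:
--     if True:
--         s = str(num)
--     n = len(s)
--     l, r = (n - 1) // 2, n // 2
--     s_list = list(s)
--     while l >= 0:
--         if True:
--             s_list[r] = s_list[l]
--         r += 1
--         l -= 1
--     if True:
--         return int(''.join(s_list))
-- ===== SOURCE B (Python) =====
-- def convert(num: int) -> int:
--     s = str(num)
--     n = len(s)
--     left = s[:(n + 1) // 2]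
--     return int(left + left[:n // 2][::-1])
-- ===== Notes on version B (the rewrite author's own statement) =====
-- stated objective: idiomatic
-- what changed: Replaces the in-place two-index mirroring loop over a char list with direct string slicing: take the left half and append the reversed first floor(n/2) characters.
import Mathlib
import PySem

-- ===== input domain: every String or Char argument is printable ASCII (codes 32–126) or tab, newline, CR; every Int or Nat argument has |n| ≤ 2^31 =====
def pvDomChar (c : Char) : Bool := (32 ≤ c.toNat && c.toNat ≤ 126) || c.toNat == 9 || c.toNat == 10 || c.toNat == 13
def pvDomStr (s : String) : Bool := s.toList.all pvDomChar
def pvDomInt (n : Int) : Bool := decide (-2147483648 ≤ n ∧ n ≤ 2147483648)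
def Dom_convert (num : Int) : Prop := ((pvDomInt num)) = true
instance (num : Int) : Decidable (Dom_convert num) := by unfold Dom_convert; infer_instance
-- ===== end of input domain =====

-- B mirrors the left half with string slices instead of A's index-walking copy loop (same result).

-- ===== PORT A =====
-- the 'while l >= 0' loop: s_list[r] = s_list[l]; r += 1; l -= 1
-- (l and r are always in range while the loop runs, so pyGet?.getD / set r.toNat are exact)
def convertLoop (sl : List Char) (l r : Int) : List Char :=
  if 0 ≤ l then
    convertLoop (sl.set r.toNat ((PySem.List.pyGet? sl l).getD ' ')) (l - 1) (r + 1)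
  else sl
termination_by (l + 1).toNat
decreasing_by omega

def convert (num : Int) : Int :=
  let s := PySem.Int.toChars num
  let n : Int := s.length
  let l := PySem.Int.floordiv (n - 1) 2
  let r := PySem.Int.floordiv n 2
  let sList := convertLoop s l r
  -- int(''.join(s_list)); Pre_convert excludes negative num, exactly where Python's int() raises ValueError
  (PySem.Int.ofChars? sList).getD 0

-- ===== PORT B =====
def convert_alt (num : Int) : Int :=
  let s := PySem.Int.toChars num
  let n : Int := s.length
  let left := PySem.List.slice s none (some (PySem.Int.floordiv (n + 1) 2))
  let res := left ++ (PySem.List.slice left none (some (PySem.Int.floordiv n 2))).reverse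
  -- int(left + left[:n//2][::-1]); raises ValueError for negative num, excluded by Pre_convert
  (PySem.Int.ofChars? res).getD 0

-- ===== PRECONDITION & SPEC =====
-- Pre_ excludes negative num: there str(num) starts with '-', the mirrored string is not a valid
-- integer literal and Python's int() raises ValueError (in A and in B alike).
def Pre_convert (num : Int) : Prop := 0 ≤ num
instance (num : Int) : Decidable (Pre_convert num) := by unfold Pre_convert; infer_instance
def pvWitness_convert : Int := 12345

def Spec_convert (num : Int) (out : Int) : Prop := out = convert_alt num
instance (num : Int) (out : Int) : Decidable (Spec_convert num out) := by unfold Spec_convert; infer_instance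

-- ===== CLAIM (what is proved, stated in full; the proofs are below) =====
def Claim_equal_convert : Prop := ∀ (num : Int), Dom_convert num → Pre_convert num → Spec_convert num (convert num)

-- ===== LEMMAS AND PROOFS =====

-- mirroring around the centre: appending one more taken char commutes with the reversal
lemma swap_half (s : List Char) (r : Nat) (hr : r < s.length) :
    s.take r ++ (s.take (r + 1)).reverse = s.take (r + 1) ++ (s.take r).reverse := by
  rw [List.take_add_one, List.getElem?_eq_getElem hr]
  simp only [Option.toList_some, List.reverse_append, List.reverse_cons, List.reverse_nil,
    List.nil_append, List.append_assoc, List.cons_append]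

-- A's copy loop, characterised: it keeps the first r characters, writes s[l], s[l-1], …, s[0]
-- at positions r, r+1, …, r+l (reading only below every write), and keeps the rest.
lemma convertLoop_eq (k : Nat) : ∀ (s : List Char) (r : Nat), k ≤ r → r + k + 1 ≤ s.length →
    convertLoop s (k : Int) (r : Int) =
      s.take r ++ (s.take (k + 1)).reverse ++ s.drop (r + k + 1) := by
  induction k with
  | zero =>
    intro s r hkr hlen
    have hr : r < s.length := by omega
    have h0 : 0 < s.length := by omega
    rw [convertLoop]
    simp only [Int.toNat_natCast, PySem.List.pyGet?_natCast,
      List.getElem?_eq_getElem h0, Option.getD_some]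
    rw [show ((0:Nat):Int) - 1 = (-1 : Int) by ring, convertLoop]
    simp only [show ¬ (0:Int) ≤ -1 by decide, if_neg, not_false_iff]
    rw [List.set_eq_take_cons_drop _ hr]
    simp [List.take_add_one, List.getElem?_eq_getElem h0]
  | succ k ih =>
    intro s r hkr hlen
    have hr : r < s.length := by omega
    have hk : k + 1 < s.length := by omega
    rw [convertLoop]
    simp only [show (0:Int) ≤ ((k+1:Nat):Int) by positivity, if_pos, Int.toNat_natCast,
      PySem.List.pyGet?_natCast, List.getElem?_eq_getElem hk, Option.getD_some]
    rw [show ((k+1:Nat):Int) - 1 = ((k:Nat):Int) by push_cast; ring,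
        show ((r:Nat):Int) + 1 = ((r+1:Nat):Int) by push_cast; ring]
    rw [ih (s.set r s[k+1]) (r+1) (by omega) (by simp; omega)]
    rw [List.set_eq_take_cons_drop _ hr]
    have hlt : (s.take r).length = r := List.length_take_of_le (by omega)
    have h1 : (s.take r ++ s[k+1] :: s.drop (r+1)).take (r+1)
        = s.take r ++ [s[k+1]] := by
      rw [show r + 1 = (s.take r).length + 1 by omega, List.take_append]
      simp
    have h2 : (s.take r ++ s[k+1] :: s.drop (r+1)).take (k+1) = s.take (k+1) := by
      rw [List.take_append_of_le_length (by rw [hlt]; omega), List.take_take]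
      rw [Nat.min_eq_left (by omega : k + 1 ≤ r)]
    have h3 : (s.take r ++ s[k+1] :: s.drop (r+1)).drop (r+1+k+1) = s.drop (r+(k+1)+1) := by
      rw [show r+1+k+1 = (s.take r).length + (k+2) by omega, List.drop_append]
      simp only [hlt]
      rw [List.drop_eq_nil_of_le (by rw [hlt]; omega),
          show r + (k + 1 + 1) - r = (k + 1) + 1 by omega,
          List.drop_succ_cons, List.drop_drop, List.nil_append]
      congr 1
      omega
    rw [h1, h2, h3]
    have h4 : (s.take (k+1+1)).reverse = s[k+1] :: (s.take (k+1)).reverse := by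
      rw [List.take_add_one, List.getElem?_eq_getElem hk]
      simp
    rw [h4]
    simp

-- A's loop from its initial indices equals B's slice construction, for any character list.
lemma mirror_eq (s : List Char) :
    convertLoop s (PySem.Int.floordiv ((s.length : Int) - 1) 2) (PySem.Int.floordiv (s.length : Int) 2)
      = PySem.List.slice s none (some (PySem.Int.floordiv ((s.length : Int) + 1) 2)) ++
        (PySem.List.slice (PySem.List.slice s none (some (PySem.Int.floordiv ((s.length : Int) + 1) 2)))
          none (some (PySem.Int.floordiv (s.length : Int) 2))).reverse := by
  rcases s with _ | ⟨c, t⟩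
  · rw [convertLoop]
    norm_num [show PySem.Int.floordiv ((0:Int) - 1) 2 = -1 from by decide,
      PySem.List.slice]
  · simp only [List.length_cons]
    push_cast
    have e1 : PySem.Int.floordiv ((t.length : Int) + 1 - 1) 2 = ((t.length / 2 : Nat) : Int) := by
      rw [show ((t.length : Int) + 1 - 1) = ((t.length : Nat) : Int) by ring]
      exact_mod_cast PySem.Int.floordiv_natCast t.length 2
    have e2 : PySem.Int.floordiv ((t.length : Int) + 1) 2 = (((t.length + 1) / 2 : Nat) : Int) := by
      rw [show ((t.length : Int) + 1) = (((t.length + 1 : Nat)) : Int) by push_cast; ring]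
      exact_mod_cast PySem.Int.floordiv_natCast (t.length + 1) 2
    have e3 : PySem.Int.floordiv ((t.length : Int) + 1 + 1) 2 = (((t.length + 2) / 2 : Nat) : Int) := by
      rw [show ((t.length : Int) + 1 + 1) = (((t.length + 2 : Nat)) : Int) by push_cast; ring]
      exact_mod_cast PySem.Int.floordiv_natCast (t.length + 2) 2
    rw [e1, e2, e3, PySem.List.slice_to_natCast, PySem.List.slice_to_natCast,
      convertLoop_eq (t.length / 2) (c :: t) ((t.length + 1) / 2) (by omega) (by simp; omega)]
    rw [List.take_take, Nat.min_eq_left (by omega : (t.length + 1) / 2 ≤ (t.length + 2) / 2)]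
    rw [List.drop_eq_nil_of_le (by simp; omega), List.append_nil]
    rw [show t.length / 2 + 1 = (t.length + 2) / 2 by omega]
    rcases Nat.even_or_odd t.length with ⟨m, hm⟩ | ⟨m, hm⟩
    · -- even t.length: the palindrome has odd length; the centre char moves across the append
      rw [show (t.length + 2) / 2 = (t.length + 1) / 2 + 1 by omega]
      exact swap_half _ _ (by simp; omega)
    · rw [show (t.length + 2) / 2 = (t.length + 1) / 2 by omega]

-- ===== VERDICT (by name: the statement is the Claim_ definition above) =====
theorem convert_spec : Claim_equal_convert := by
  intro num _ _
  unfold Spec_convert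
  simp only [convert, convert_alt]
  rw [mirror_eq]
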